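-- pv_equiv track=rewrite | github.com/jader01/R208 | Help.py | freresoeur
-- ===== SOURCE A (Python) =====
-- def freresoeur(tab,id_enfant):
--     res = []
--     for i in range (len(tab)):
--         if tab[i][1] == id_enfant:
--             id_parent = tab [i][0]
--     for i in range (len(tab)):
--         if id_parent == tab [i][0] and tab[i][1] != id_enfant:
--             temp = tab [i][1]
--             res.append(temp)
--     return res
-- ===== SOURCE B (Python) =====
-- def freresoeur(tab, id_enfant):
--     groups = {}
--     for p, c in tab:
--         groups.setdefault(p, []).append(c)
--         if c == id_enfant:
--             id_parent = p
--     return [c for c in groups[id_parent] if c != id_enfant]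
-- ===== Notes on version B (the rewrite author's own statement) =====
-- stated objective: idiomatic
-- what changed: Replaces A's two scans of the table by a single pass that groups children under each parent in a dict while tracking the (last) parent of id_enfant, then filters that parent's group.
-- outside the precondition, e.g. on freresoeur([], 0): A returns [], B raises UnboundLocalError; on freresoeur([(1, 2)], 5): A raises NameError, B raises UnboundLocalError
import Mathlib
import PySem

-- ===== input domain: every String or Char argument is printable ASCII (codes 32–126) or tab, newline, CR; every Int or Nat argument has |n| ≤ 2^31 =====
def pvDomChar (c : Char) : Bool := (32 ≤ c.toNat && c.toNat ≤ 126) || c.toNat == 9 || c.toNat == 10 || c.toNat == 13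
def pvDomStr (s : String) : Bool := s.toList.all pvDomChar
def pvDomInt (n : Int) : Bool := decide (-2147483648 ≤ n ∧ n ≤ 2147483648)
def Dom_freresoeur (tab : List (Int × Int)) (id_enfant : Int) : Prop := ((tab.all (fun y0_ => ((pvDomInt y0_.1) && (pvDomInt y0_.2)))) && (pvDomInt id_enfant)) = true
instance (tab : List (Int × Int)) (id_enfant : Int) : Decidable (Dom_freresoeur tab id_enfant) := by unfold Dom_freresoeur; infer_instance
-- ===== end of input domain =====

-- B: one pass that groups children under each parent in a dict while tracking the parent
-- of id_enfant, instead of A's two separate scans of the table (objective: idiomatic).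

-- ===== PORT A =====
-- A: first loop finds the LAST row whose child is id_enfant (id_parent unbound if none);
-- second loop collects children of that parent other than id_enfant, in table order.
def freresoeur (tab : List (Int × Int)) (id_enfant : Int) : List Int :=
  let id_parent : Option Int :=
    tab.foldl (fun acc row => if row.2 == id_enfant then some row.1 else acc) none
  match id_parent with
  | none => []          -- id_parent unbound: NameError in Python (outside Pre_), except that
                        -- with tab = [] the second loop is also empty and A returns [] (outside Pre_)
  | some p =>
    tab.foldl (fun res row =>
      if p == row.1 && !(row.2 == id_enfant) then res ++ [row.2] else res) []

-- ===== PORT B =====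
-- groups.setdefault(p, []).append(c)  ==  modify p [] (· ++ [c]) on the PySem.Dict
def freresoeur_alt (tab : List (Int × Int)) (id_enfant : Int) : List Int :=
  let st : PySem.Dict Int (List Int) × Option Int :=
    tab.foldl (fun st row =>
      (st.1.modify row.1 [] (· ++ [row.2]),
       if row.2 == id_enfant then some row.1 else st.2))
      (PySem.Dict.empty, none)
  match st.2 with
  | none => []          -- id_parent unbound: NameError in Python (outside Pre_)
  | some p => (st.1.getD p []).filter (fun c => !(c == id_enfant))

-- ===== PRECONDITION & SPEC =====
-- Pre_ excludes inputs where id_enfant never occurs as a child (second column): there both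
-- programs' id_parent is unbound, so A raises NameError when tab is non-empty, and on the
-- one such input where A still returns — tab = [], where A's [] is an accident of its
-- empty second loop — B raises UnboundLocalError as well, so tab = [] must stay outside.
def Pre_freresoeur (tab : List (Int × Int)) (id_enfant : Int) : Prop :=
  (tab.any (fun row => row.2 == id_enfant)) = true
instance (tab : List (Int × Int)) (id_enfant : Int) : Decidable (Pre_freresoeur tab id_enfant) := by unfold Pre_freresoeur; infer_instance

def pvWitness_freresoeur : (List (Int × Int)) × Int := ([(1, 2), (1, 3), (2, 4)], 2)

def Spec_freresoeur (tab : List (Int × Int)) (id_enfant : Int) (out : List Int) : Prop := out = freresoeur_alt tab id_enfant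
instance (tab : List (Int × Int)) (id_enfant : Int) (out : List Int) : Decidable (Spec_freresoeur tab id_enfant out) := by unfold Spec_freresoeur; infer_instance

-- ===== CLAIM (what is proved, stated in full; the proofs are below) =====
def Claim_equal_freresoeur : Prop := ∀ (tab : List (Int × Int)) (id_enfant : Int), Dom_freresoeur tab id_enfant → Pre_freresoeur tab id_enfant → Spec_freresoeur tab id_enfant (freresoeur tab id_enfant)

-- ===== LEMMAS AND PROOFS =====

-- B's paired fold splits into its two independent component folds.
theorem pv_fold_pair (tab : List (Int × Int)) (id_enfant : Int)
    (d0 : PySem.Dict Int (List Int)) (o0 : Option Int) :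
    tab.foldl (fun st row =>
      (st.1.modify row.1 [] (· ++ [row.2]),
       if row.2 == id_enfant then some row.1 else st.2)) (d0, o0)
    = (tab.foldl (fun d row => d.modify row.1 [] (· ++ [row.2])) d0,
       tab.foldl (fun o row => if row.2 == id_enfant then some row.1 else o) o0) := by
  induction tab generalizing d0 o0 with
  | nil => rfl
  | cons r t ih => simp only [List.foldl_cons]; exact ih _ _

-- A's second loop is the filtered projection of the rows with parent p.
theorem pv_fold_filter (tab : List (Int × Int)) (id_enfant p : Int) (acc : List Int) :
    tab.foldl (fun res row =>
      if p == row.1 && !(row.2 == id_enfant) then res ++ [row.2] else res) acc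
    = acc ++ ((tab.filter (fun row => row.1 == p)).map (·.2)).filter
        (fun c => !(c == id_enfant)) := by
  induction tab generalizing acc with
  | nil => simp
  | cons r t ih =>
    simp only [List.foldl_cons]
    rw [ih]
    by_cases h1 : r.1 = p
    · by_cases h2 : r.2 = id_enfant
      · simp [h1, h2]
      · simp [h1, h2]
    · have h1' : ¬ p = r.1 := fun h => h1 h.symm
      simp [h1, h1']

theorem pv_spec (tab : List (Int × Int)) (id_enfant : Int)
    (hpre : Pre_freresoeur tab id_enfant) :
    freresoeur tab id_enfant = freresoeur_alt tab id_enfant := by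
  unfold freresoeur freresoeur_alt
  rw [pv_fold_pair]
  cases hp : tab.foldl (fun o row => if row.2 == id_enfant then some row.1 else o) none with
  | none =>
    -- impossible under Pre_: some row has child id_enfant, so the fold is some _
    exfalso
    unfold Pre_freresoeur at hpre
    rw [List.any_eq_true] at hpre
    obtain ⟨row, hmem, hrow⟩ := hpre
    obtain ⟨l1, l2, rfl⟩ := List.append_of_mem hmem
    rw [List.foldl_append, List.foldl_cons, if_pos hrow] at hp
    -- a fold that only keeps or replaces a `some` accumulator stays `some`
    have : ∀ (l : List (Int × Int)) (x : Int),
        l.foldl (fun o row => if row.2 == id_enfant then some row.1 else o) (some x) ≠ none := by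
      intro l
      induction l with
      | nil => intro x h; simp at h
      | cons r t ih =>
        intro x
        simp only [List.foldl_cons]
        by_cases h : r.2 == id_enfant
        · simp only [h, if_true]; exact ih _
        · simp only [h]; exact ih _
    exact this _ _ hp
  | some p =>
    simp only
    rw [pv_fold_filter, List.nil_append,
      PySem.Dict.getD_foldl_modify_append tab PySem.Dict.empty p,
      PySem.Dict.getD_empty, List.nil_append]

-- ===== VERDICT (by name: the statement is the Claim_ definition above) =====
theorem freresoeur_spec : Claim_equal_freresoeur := by
  intro tab id_enfant _ hpre
  unfold Spec_freresoeur
  exact pv_spec tab id_enfant hpre
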